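-- pv_equiv track=rewrite | github.com/Artiehen/Python_Modules_42Be | m03/ex5/ft_data_stream.py | filter_important_event
-- ===== SOURCE A (Python) =====
-- def filter_important_event(stream):
--     list_events = ["Killed monster", "found treasure", "leveled up!"]
--     important_events = iter(list_events)
--     for event in stream:
--         if event % 10 == 0:
--             try:
--                 yield next(important_events)
--             except StopIteration:
--                 important_events = iter(list_events)
--                 yield next(important_events)
-- ===== SOURCE B (Python) =====
-- def filter_important_event(stream):
--     list_events = ["Killed monster", "found treasure", "leveled up!"]
--     n = sum(1 for event in stream if event % 10 == 0)
--     yield from (list_events * ((n + 2) // 3))[:n]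
-- ===== Notes on version B (the rewrite author's own statement) =====
-- stated objective: alternative
-- what changed: B is a staged computation: one pass counts the multiples of 10, then the whole output is produced at once as a slice of the replicated three-event list, removing the per-element yield/cycling state (iterator reset) entirely.
import Mathlib
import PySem

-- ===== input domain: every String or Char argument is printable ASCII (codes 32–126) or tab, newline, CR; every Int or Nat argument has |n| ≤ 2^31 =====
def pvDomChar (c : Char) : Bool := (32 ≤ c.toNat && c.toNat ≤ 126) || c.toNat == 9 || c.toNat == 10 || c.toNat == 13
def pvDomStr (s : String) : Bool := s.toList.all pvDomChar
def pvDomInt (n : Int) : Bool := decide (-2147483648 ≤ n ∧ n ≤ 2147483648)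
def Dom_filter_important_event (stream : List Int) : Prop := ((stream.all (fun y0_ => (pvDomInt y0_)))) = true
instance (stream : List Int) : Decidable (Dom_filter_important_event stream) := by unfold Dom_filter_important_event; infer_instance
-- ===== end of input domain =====

-- B replaces A's lazy cycling iterator by a staged computation: count the multiples of 10, then slice the replicated event list (alternative decomposition; generator laziness not modelled: return-value equivalence).


-- ===== PORT A =====
-- A's fixed event list; A's cycling state is an iterator position i (0..3; 3 = exhausted)
def pvEvents : List String := ["Killed monster", "found treasure", "leveled up!"]

def pvA_loop (i : Nat) : List Int → List String
  | [] => []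
  | e :: rest =>
    if PySem.Int.mod e 10 == 0 then
      if i < 3 then pvEvents.getD i "" :: pvA_loop (i + 1) rest
      else pvEvents.getD 0 "" :: pvA_loop 1 rest   -- StopIteration: reset iterator, yield first
    else pvA_loop i rest

def filter_important_event (stream : List Int) : List String := pvA_loop 0 stream

-- ===== PORT B =====
-- n = sum(1 for event in stream if event % 10 == 0); (list_events * ((n+2)//3))[:n]
-- Nat division = Python // and .take n = [:n] here since n ≥ 0.
def filter_important_event_alt (stream : List Int) : List String :=
  let n := (stream.filter (fun e => PySem.Int.mod e 10 == 0)).length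
  (List.flatten (List.replicate ((n + 2) / 3) pvEvents)).take n

-- ===== PRECONDITION & SPEC =====
def Spec_filter_important_event (stream : List Int) (out : List String) : Prop := out = filter_important_event_alt stream
instance (stream : List Int) (out : List String) : Decidable (Spec_filter_important_event stream out) := by unfold Spec_filter_important_event; infer_instance

-- ===== CLAIM (what is proved, stated in full; the proofs are below) =====
def Claim_equal_filter_important_event : Prop := ∀ (stream : List Int), Dom_filter_important_event stream → Spec_filter_important_event stream (filter_important_event stream)

-- ===== LEMMAS AND PROOFS =====
-- the abstract cyclic output: g c n = n events starting at position c (mod 3)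
def pvG (c : Nat) : Nat → List String
  | 0 => []
  | n + 1 => pvEvents.getD (c % 3) "" :: pvG (c + 1) n

theorem pvG_add_three (n : Nat) : ∀ c, pvG (c + 3) n = pvG c n := by
  induction n with
  | zero => intro c; rfl
  | succ n ih =>
    intro c
    simp only [pvG, Nat.add_mod_right]
    rw [show c + 3 + 1 = (c + 1) + 3 by omega, ih]

-- A's loop produces the cyclic sequence of length (number of hits)
theorem pvA_eq_G (stream : List Int) : ∀ i : Nat, i ≤ 3 →
    pvA_loop i stream = pvG i ((stream.filter (fun e => PySem.Int.mod e 10 == 0)).length) := by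
  induction stream with
  | nil => intro i _; rfl
  | cons e rest ih =>
    intro i hle
    simp only [pvA_loop, List.filter]
    by_cases h : (PySem.Int.mod e 10 == 0) = true
    · simp only [h, reduceIte, List.length_cons, pvG]
      by_cases h3 : i < 3
      · simp only [if_pos h3]
        rw [Nat.mod_eq_of_lt h3, ih (i+1) (by omega)]
      · have hi3 : i = 3 := by omega
        subst hi3
        simp only [if_neg h3]
        rw [ih 1 (by omega), show (3:Nat) + 1 = 1 + 3 by omega, pvG_add_three]
    · simp only [h]
      exact ih i hle

-- appending one full copy of the event list extends the cyclic sequence by three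
theorem pvG_events_append (k : Nat) : pvG 0 (k + 3) = pvEvents ++ pvG 0 k := by
  show pvG 0 (k + 2 + 1) = _
  simp only [pvG]
  rw [show (0:Nat) + 1 + 1 + 1 = 0 + 3 by omega, pvG_add_three]
  rfl

-- B's slice of the replicated list equals the cyclic sequence
theorem pvTake_eq_G : ∀ m n : Nat, n ≤ 3 * m →
    (List.flatten (List.replicate m pvEvents)).take n = pvG 0 n := by
  intro m
  induction m with
  | zero => intro n hn; interval_cases n; rfl
  | succ m ih =>
    intro n hn
    rw [List.replicate_succ, List.flatten_cons]
    by_cases h3 : n ≤ 3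
    · interval_cases n <;> simp [pvEvents, pvG]
    · rw [List.take_append,
        List.take_of_length_le (show pvEvents.length ≤ n by simp [pvEvents]; omega),
        show n - pvEvents.length = n - 3 from rfl,
        ih (n - 3) (by omega),
        show n = (n - 3) + 3 by omega, pvG_events_append]
      simp

-- ===== VERDICT (by name: the statement is the Claim_ definition above) =====
theorem filter_important_event_spec : Claim_equal_filter_important_event := by
  intro stream _
  unfold Spec_filter_important_event filter_important_event filter_important_event_alt
  rw [pvA_eq_G stream 0 (by omega), pvTake_eq_G _ _ (by omega)]
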